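-- pv_equiv track=rewrite | github.com/truszk/gtprob | calcProbConcordant.py | sum_adjacent_pairs
-- ===== SOURCE A (Python) =====
-- def sum_adjacent_pairs(lst):
-- 	pairsums=[]
-- 	for i in range(len(lst)):
-- 		if i%2==0:
-- 			pairsums.append(lst[i])
-- 		else:
-- 			pairsums[-1]+=lst[i]
-- 	return pairsums
-- ===== SOURCE B (Python) =====
-- def sum_adjacent_pairs(lst):
-- 	evens = lst[0::2]
-- 	odds = lst[1::2]
-- 	for i in range(len(odds)):
-- 		evens[i] += odds[i]
-- 	return evens
-- ===== Notes on version B (the rewrite author's own statement) =====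
-- stated objective: simpler
-- what changed: Replaces A's per-index parity branching with accumulator-on-last-slot bookkeeping by splitting the list into two strided slices (evens, odds) and adding them pointwise, the odd-length leftover staying in evens.
import Mathlib
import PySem

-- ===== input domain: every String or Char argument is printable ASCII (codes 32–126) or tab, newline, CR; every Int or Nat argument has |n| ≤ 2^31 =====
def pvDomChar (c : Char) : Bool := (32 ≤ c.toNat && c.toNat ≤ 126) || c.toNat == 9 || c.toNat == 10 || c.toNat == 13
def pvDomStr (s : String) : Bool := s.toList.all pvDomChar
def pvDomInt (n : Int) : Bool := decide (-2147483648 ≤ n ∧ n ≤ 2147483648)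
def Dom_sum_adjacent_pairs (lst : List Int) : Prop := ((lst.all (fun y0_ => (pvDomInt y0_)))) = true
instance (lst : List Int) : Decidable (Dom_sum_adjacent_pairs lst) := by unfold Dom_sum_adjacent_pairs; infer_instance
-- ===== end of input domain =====

-- B replaces A's per-index parity branching (append on even i, add into the last slot on
-- odd i) with two strided slices added pointwise; same O(n) cost, simpler shape.

-- ===== PORT A =====
-- body of A's loop; 'pairsums[-1] += lst[i]' is ported as dropLast ++ [pairsums[-1] + lst[i]],
-- exact whenever pairsums is nonempty, which holds whenever that branch is reached
-- (i odd, so an element was appended at step i-1).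
def bodyA (lst : List Int) (pairsums : List Int) (i : Int) : List Int :=
  if PySem.Int.mod i 2 == 0 then
    pairsums ++ [PySem.List.pyGetD lst i 0]
  else
    pairsums.dropLast ++ [PySem.List.pyGetD pairsums (-1) 0 + PySem.List.pyGetD lst i 0]

def sum_adjacent_pairs (lst : List Int) : List Int :=
  (PySem.List.pyRange 0 lst.length 1).foldl (bodyA lst) []

-- ===== PORT B =====
-- lst[0::2] / lst[1::2]: extended slice with step 2, ported by hand (exact: every
-- second element of the list, starting at index 0 resp. 1).
def stride2 : List Int → List Int
  | [] => []
  | [x] => [x]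
  | x :: _ :: rest => x :: stride2 rest

-- body of B's loop; 'evens[i] += odds[i]' read+assign (indices i always in range)
def bodyB (odds : List Int) (evens : List Int) (i : Int) : List Int :=
  PySem.List.pySetD evens i (PySem.List.pyGetD evens i 0 + PySem.List.pyGetD odds i 0)

def sum_adjacent_pairs_alt (lst : List Int) : List Int :=
  let evens := stride2 lst
  let odds := stride2 lst.tail
  (PySem.List.pyRange 0 odds.length 1).foldl (bodyB odds) evens

-- ===== PRECONDITION & SPEC =====
def Spec_sum_adjacent_pairs (lst : List Int) (out : List Int) : Prop := out = sum_adjacent_pairs_alt lst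
instance (lst : List Int) (out : List Int) : Decidable (Spec_sum_adjacent_pairs lst out) := by unfold Spec_sum_adjacent_pairs; infer_instance

-- ===== CLAIM (what is proved, stated in full; the proofs are below) =====
def Claim_equal_sum_adjacent_pairs : Prop := ∀ (lst : List Int), Dom_sum_adjacent_pairs lst → Spec_sum_adjacent_pairs lst (sum_adjacent_pairs lst)

-- ===== LEMMAS AND PROOFS =====

-- the pairwise-sum characterisation both ports are proved equal to
def pairsSpec : List Int → List Int
  | [] => []
  | [x] => [x]
  | x :: y :: t => (x + y) :: pairsSpec t

lemma loopA (t : List Int) : ∀ (lst : List Int) (b : Nat) (acc : List Int),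
    lst.drop b = t → b % 2 = 0 →
    (PySem.List.pyRange (b : Int) (b + t.length) 1).foldl (bodyA lst) acc
      = acc ++ pairsSpec t := by
  induction t using pairsSpec.induct with
  | case1 =>
    intro lst b acc h hb
    simp [PySem.List.pyRange_one_eq_nil, pairsSpec]
  | case2 x =>
    intro lst b acc h hb
    have hb2 : b < lst.length := by
      have := congrArg List.length h; simp at this; omega
    have hx : lst[b] = x := by
      have : (lst.drop b)[0]'(by simp [h]) = x := by simp [h]
      simpa using this
    have hbe : ((b:Int)).fmod 2 = 0 := by rw [Int.fmod_eq_emod]; simp; omega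
    rw [show ((b:Int) + ([x]:List Int).length) = (b:Int) + 1 by simp,
        PySem.List.pyRange_one_singleton]
    simp [bodyA, PySem.Int.mod, hbe, pairsSpec, List.getElem?_eq_getElem hb2, hx]
  | case3 x y t ih =>
    intro lst b acc h hb
    have hlen : b + 2 ≤ lst.length := by
      have := congrArg List.length h; simp at this; omega
    have hx : lst[b]'(by omega) = x := by
      have : (lst.drop b)[0]'(by simp [h]) = x := by simp [h]
      simpa using this
    have hy : lst[b+1]'(by omega) = y := by
      have : (lst.drop b)[1]'(by simp [h]) = y := by simp [h]
      simpa using this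
    have hbe : ((b:Int)).fmod 2 = 0 := by rw [Int.fmod_eq_emod]; simp; omega
    have hbo : ¬ ((b:Int)+1).fmod 2 = 0 := by rw [Int.fmod_eq_emod]; simp; omega
    have hcons1 : PySem.List.pyRange (b:Int) ((b:Int) + (x :: y :: t).length) 1
        = (b:Int) :: PySem.List.pyRange ((b:Int)+1) ((b:Int) + (x :: y :: t).length) 1 := by
      apply PySem.List.pyRange_one_cons; push_cast [List.length_cons]; omega
    have hcons2 : PySem.List.pyRange ((b:Int)+1) ((b:Int) + (x :: y :: t).length) 1
        = ((b:Int)+1) :: PySem.List.pyRange ((b:Int)+2) ((b:Int) + (x :: y :: t).length) 1 := by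
      apply PySem.List.pyRange_one_cons; push_cast [List.length_cons]; omega
    rw [hcons1, hcons2]
    simp only [List.foldl_cons]
    have e1 : bodyA lst acc (b:Int) = acc ++ [x] := by
      simp [bodyA, PySem.Int.mod, hbe,
        List.getElem?_eq_getElem (show b < lst.length by omega), hx]
    have e2 : bodyA lst (acc ++ [x]) ((b:Int)+1) = acc ++ [x + y] := by
      have cast1 : ((b:Int)+1) = (((b+1 : Nat)):Int) := by push_cast; ring
      have hgy : PySem.List.pyGetD lst ((b:Int)+1) 0 = y := by
        rw [cast1, PySem.List.pyGetD_natCast]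
        simp [List.getD, List.getElem?_eq_getElem (show b+1 < lst.length by omega), hy]
      rw [bodyA]
      simp [PySem.Int.mod, hbo, hgy,
        PySem.List.pyGetD_neg_one_append_singleton]
    rw [e1, e2]
    have ht : lst.drop (b+2) = t := by
      have h2 : lst.drop (b+2) = (lst.drop b).drop 2 := by rw [List.drop_drop]
      simp [h2, h]
    have cast2 : ((b:Int) + (x :: y :: t).length) = ((b+2 : Nat):Int) + t.length := by
      push_cast; simp; ring
    rw [cast2, show ((b:Int)+2) = (((b+2 : Nat)):Int) by push_cast; ring]
    rw [ih lst (b+2) (acc ++ [x + y]) ht (by omega)]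
    simp [pairsSpec]

lemma loopB : ∀ (m : Nat) (ev od : List Int), m ≤ od.length → od.length ≤ ev.length →
    (PySem.List.pyRange 0 (m : Int) 1).foldl (bodyB od) ev
      = List.zipWith (· + ·) (ev.take m) (od.take m) ++ ev.drop m := by
  intro m
  induction m with
  | zero => intro ev od _ _; simp [PySem.List.pyRange_one_eq_nil]
  | succ m ih =>
    intro ev od hm hlen
    have hm' : m < od.length := by omega
    have hme : m < ev.length := by omega
    rw [show ((m+1 : Nat) : Int) = ((m:Nat):Int) + 1 by push_cast; ring,
        PySem.List.pyRange_one_succ_right (by omega : (0:Int) ≤ (m:Nat)),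
        List.foldl_append]
    rw [ih ev od (by omega) hlen]
    set Z := List.zipWith (· + ·) (ev.take m) (od.take m) with hZ
    have hZlen : Z.length = m := by simp [hZ]; omega
    have hRget : PySem.List.pyGetD (Z ++ ev.drop m) (m:Int) 0 = ev[m] := by
      rw [PySem.List.pyGetD_natCast]
      simp [List.getD, List.getElem?_append_right (by omega : Z.length ≤ m), hZlen,
        List.getElem?_drop, List.getElem?_eq_getElem hme]
    have hOget : PySem.List.pyGetD od (m:Int) 0 = od[m] := by
      rw [PySem.List.pyGetD_natCast]
      simp [List.getD, List.getElem?_eq_getElem hm']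
    simp only [List.foldl_cons, List.foldl_nil, bodyB, hRget, hOget,
      PySem.List.pySetD_natCast]
    have hset : (Z ++ ev.drop m).set m (ev[m] + od[m])
        = Z ++ (ev[m] + od[m]) :: ev.drop (m+1) := by
      rw [List.set_append_right _ _ (by omega), hZlen, Nat.sub_self,
          List.drop_eq_getElem_cons hme, List.set_cons_zero]
    rw [hset]
    have htake_e : ev.take (m+1) = ev.take m ++ [ev[m]] := by
      rw [List.take_succ]; simp [List.getElem?_eq_getElem hme]
    have htake_o : od.take (m+1) = od.take m ++ [od[m]] := by
      rw [List.take_succ]; simp [List.getElem?_eq_getElem hm']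
    rw [htake_e, htake_o,
        List.zipWith_append (by simp; omega)]
    simp [hZ]

lemma length_stride2 (l : List Int) : (stride2 l).length = (l.length + 1) / 2 := by
  induction l using stride2.induct with
  | case1 => simp [stride2]
  | case2 x => simp [stride2]
  | case3 x y t ih => simp [stride2, ih]; omega

lemma stride2_tail_cons_cons (x y : Int) (t : List Int) :
    stride2 (y :: t) = y :: stride2 t.tail := by
  cases t with
  | nil => simp [stride2]
  | cons z tt => simp [stride2]

lemma spec_eq_zip (lst : List Int) :
    pairsSpec lst
      = List.zipWith (· + ·) (stride2 lst) (stride2 lst.tail)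
          ++ (stride2 lst).drop (stride2 lst.tail).length := by
  induction lst using pairsSpec.induct with
  | case1 => simp [pairsSpec, stride2]
  | case2 x => simp [pairsSpec, stride2]
  | case3 x y t ih =>
    simp only [List.tail_cons, stride2, stride2_tail_cons_cons x y t]
    simp only [List.zipWith_cons_cons, List.length_cons, List.drop_succ_cons]
    rw [pairsSpec]
    rw [ih]
    rfl

lemma alt_eq_pairsSpec (lst : List Int) : sum_adjacent_pairs_alt lst = pairsSpec lst := by
  unfold sum_adjacent_pairs_alt
  have hle : (stride2 lst.tail).length ≤ (stride2 lst).length := by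
    rw [length_stride2, length_stride2]
    cases lst <;> simp <;> try omega
  rw [loopB (stride2 lst.tail).length (stride2 lst) (stride2 lst.tail) le_rfl hle]
  rw [← List.take_zipWith]
  rw [List.take_of_length_le (by simp)]
  rw [spec_eq_zip]

lemma a_eq_pairsSpec (lst : List Int) : sum_adjacent_pairs lst = pairsSpec lst := by
  have h := loopA lst lst 0 [] (by simp) (by simp)
  simpa [sum_adjacent_pairs] using h

-- ===== VERDICT (by name: the statement is the Claim_ definition above) =====
theorem sum_adjacent_pairs_spec : Claim_equal_sum_adjacent_pairs := by
  intro lst _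
  unfold Spec_sum_adjacent_pairs
  rw [alt_eq_pairsSpec, a_eq_pairsSpec]
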